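-- pv_equiv track=rewrite | github.com/osrswiki/osrswiki-android | tools/js/deploy/deploy_modules.py | _extract_module_source_from_content
-- ===== SOURCE A (Python) =====
-- def _extract_module_source_from_content(content: str) -> str:
--     """Extract the actual module source from ResourceLoader-compatible format."""
--     # Look for the line with "// Original module source"
--     lines = content.split('\n')
--     source_start = -1
--
--     for i, line in enumerate(lines):
--         if '// Original module source' in line:
--             source_start = i + 1
--             break
--
--     if source_start >= 0 and source_start < len(lines):
--         # Get everything after the "Original module source" comment
--         return '\n'.join(lines[source_start:]).strip()
--
--     # Fallback: return content as-is if we can't find the marker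
--     return content
-- ===== SOURCE B (Python) =====
-- def _extract_module_source_from_content(content: str) -> str:
--     """Extract the actual module source from ResourceLoader-compatible format."""
--     marker = '// Original module source'
--     idx = content.find(marker)
--     if idx == -1:
--         return content
--     nl = content.find('\n', idx)
--     if nl == -1:
--         # Marker sits on the final line: nothing follows it
--         return content
--     return content[nl + 1:].strip()
-- ===== Notes on version B (the rewrite author's own statement) =====
-- stated objective: simpler
-- what changed: B drops A's split-into-lines list, enumerate scan and join: it works directly on the raw string, locating the marker with one find, the end of that line with a second find, and returning the stripped slice after it (falling back to the raw content when either find fails).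
import Mathlib
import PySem

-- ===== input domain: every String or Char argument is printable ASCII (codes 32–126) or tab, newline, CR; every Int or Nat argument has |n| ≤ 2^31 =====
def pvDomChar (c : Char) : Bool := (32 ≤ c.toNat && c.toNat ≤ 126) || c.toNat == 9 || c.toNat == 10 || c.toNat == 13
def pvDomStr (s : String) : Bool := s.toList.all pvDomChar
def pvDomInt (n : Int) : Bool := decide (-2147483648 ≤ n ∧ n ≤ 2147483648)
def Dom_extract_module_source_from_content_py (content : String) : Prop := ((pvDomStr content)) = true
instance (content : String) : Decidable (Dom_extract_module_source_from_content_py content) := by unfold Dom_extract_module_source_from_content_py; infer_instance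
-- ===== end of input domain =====

-- B replaces A's split-into-lines list, enumerate scan and join with two direct index
-- searches on the raw string (find marker, find next newline) and one slice: simpler.

-- shared constant: the marker comment both programs search for
def pvMarker : List Char := "// Original module source".toList

-- ===== PORT A =====
-- the loop 'for i, line in enumerate(lines): if marker in line: source_start = i + 1; break'
def pvFindStart : Int → List (List Char) → Int
  | _, [] => -1
  | i, line :: rest =>
    if PySem.Chars.isIn pvMarker line then i + 1 else pvFindStart (i + 1) rest

def extract_module_source_from_content_py (content : String) : String :=
  let lines := PySem.Chars.splitOn content.toList ['\n']
  let source_start := pvFindStart 0 lines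
  if 0 ≤ source_start ∧ source_start < (lines.length : Int) then
    String.ofList (PySem.Chars.strip (PySem.Chars.join ['\n'] (PySem.List.slice lines (some source_start) none)))
  else content

-- ===== PORT B =====
def extract_module_source_from_content_py_alt (content : String) : String :=
  let idx := PySem.Chars.find content.toList pvMarker
  if idx = -1 then content
  else
    let nl := PySem.Chars.findFrom content.toList ['\n'] idx
    if nl = -1 then content
    else String.ofList (PySem.Chars.strip (PySem.List.slice content.toList (some (nl + 1)) none))

-- ===== PRECONDITION & SPEC =====
def Spec_extract_module_source_from_content_py (content : String) (out : String) : Prop := out = extract_module_source_from_content_py_alt content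
instance (content : String) (out : String) : Decidable (Spec_extract_module_source_from_content_py content out) := by unfold Spec_extract_module_source_from_content_py; infer_instance

-- ===== CLAIM (what is proved, stated in full; the proofs are below) =====
def Claim_equal_extract_module_source_from_content_py : Prop := ∀ (content : String), Dom_extract_module_source_from_content_py content → Spec_extract_module_source_from_content_py content (extract_module_source_from_content_py content)

-- ===== LEMMAS AND PROOFS =====

-- structural model of content.split('\n')
def mySplit : List Char → List (List Char)
  | [] => [[]]
  | c :: r => if c = '\n' then [] :: mySplit r else (mySplit r).modifyHead (c :: ·)

lemma mySplit_ne_nil (cs : List Char) : mySplit cs ≠ [] := by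
  induction cs with
  | nil => simp [mySplit]
  | cons c r ih =>
    simp only [mySplit]
    split
    · simp
    · cases h : mySplit r with
      | nil => exact absurd h ih
      | cons q t => simp [List.modifyHead]

lemma mySplit_nl (r : List Char) : mySplit ('\n' :: r) = [] :: mySplit r := by
  simp [mySplit]

lemma mySplit_cons {c : Char} (r : List Char) (hc : ¬ c = '\n') :
    mySplit (c :: r) = (mySplit r).modifyHead (c :: ·) := by
  simp [mySplit, hc]

lemma splitOn_go_eq (fuel : Nat) : ∀ (l cur : List Char) (acc : List (List Char)),
    l.length < fuel →
    PySem.Chars.splitOn.go ['\n'] fuel l cur acc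
      = acc.reverse ++ (mySplit l).modifyHead (cur.reverse ++ ·) := by
  induction fuel with
  | zero => intro l cur acc h; omega
  | succ n ih =>
    intro l cur acc h
    cases l with
    | nil =>
      rw [PySem.Chars.splitOn.go.eq_2 _ _ _ _ (by simp)]
      simp [mySplit, List.modifyHead]
    | cons c rest =>
      rw [PySem.Chars.splitOn.go.eq_3]
      by_cases hc : c = '\n'
      · subst hc
        rw [if_pos (by simp [List.isPrefixOf])]
        rw [ih _ _ _ (by simp at h ⊢; omega)]
        rw [mySplit_nl]
        cases hq : mySplit rest with
        | nil => exact absurd hq (mySplit_ne_nil rest)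
        | cons q t => simp [hq, List.modifyHead]
      · rw [if_neg (by simp [List.isPrefixOf]; exact fun hh => hc hh.symm)]
        rw [ih _ _ _ (by simp at h ⊢; omega)]
        rw [mySplit_cons rest hc]
        cases hq : mySplit rest with
        | nil => exact absurd hq (mySplit_ne_nil rest)
        | cons q t => simp [List.modifyHead]

lemma splitOn_eq_mySplit (cs : List Char) : PySem.Chars.splitOn cs ['\n'] = mySplit cs := by
  rw [PySem.Chars.splitOn.eq_1, splitOn_go_eq _ _ _ _ (by omega)]
  cases hq : mySplit cs with
  | nil => exact absurd hq (mySplit_ne_nil cs)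
  | cons q t => simp [List.modifyHead]

lemma join_mySplit (cs : List Char) : PySem.Chars.join ['\n'] (mySplit cs) = cs := by
  induction cs with
  | nil => simp [mySplit, PySem.Chars.join_singleton]
  | cons c r ih =>
    by_cases hc : c = '\n'
    · subst hc
      rw [mySplit_nl]
      cases hq : mySplit r with
      | nil => exact absurd hq (mySplit_ne_nil r)
      | cons q t =>
        rw [PySem.Chars.join_cons_cons]
        rw [hq] at ih
        simp [ih]
    · rw [mySplit_cons r hc]
      cases hq : mySplit r with
      | nil => exact absurd hq (mySplit_ne_nil r)
      | cons q t =>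
        rw [hq] at ih
        simp only [List.modifyHead]
        cases t with
        | nil =>
          rw [PySem.Chars.join_singleton] at ih ⊢
          simp [ih]
        | cons y t' =>
          rw [PySem.Chars.join_cons_cons] at ih ⊢
          simp [← ih]

lemma mySplit_no_nl {cs : List Char} (h : '\n' ∉ cs) : mySplit cs = [cs] := by
  induction cs with
  | nil => rfl
  | cons c r ih =>
    simp only [List.mem_cons, not_or] at h
    have hc : ¬ c = '\n' := fun hh => h.1 hh.symm
    simp [mySplit, hc, ih h.2, List.modifyHead]

lemma mySplit_append {a : List Char} (b : List Char) (h : '\n' ∉ a) :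
    mySplit (a ++ '\n' :: b) = a :: mySplit b := by
  induction a with
  | nil => simp [mySplit]
  | cons c r ih =>
    simp only [List.mem_cons, not_or] at h
    have hc : ¬ c = '\n' := fun hh => h.1 hh.symm
    simp [mySplit, hc, ih h.2, List.modifyHead]

lemma nl_decomp {cs : List Char} (h : '\n' ∈ cs) :
    ∃ a b, cs = a ++ '\n' :: b ∧ '\n' ∉ a := by
  induction cs with
  | nil => simp at h
  | cons c r ih =>
    by_cases hc : c = '\n'
    · exact ⟨[], r, by simp [hc], by simp⟩
    · have hr : '\n' ∈ r := by
        rcases List.mem_cons.mp h with h1 | h1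
        · exact absurd h1.symm hc
        · exact h1
      rcases ih hr with ⟨a, b, hab, hna⟩
      exact ⟨c :: a, b, by simp [hab], by
        simp only [List.mem_cons, not_or]
        exact ⟨fun hh => hc hh.symm, hna⟩⟩

-- a marker that contains no newline cannot reach past a newline
lemma prefix_through_nl {M : List Char} (hM : '\n' ∉ M) (u v : List Char) :
    M <+: (u ++ '\n' :: v) ↔ M <+: u := by
  induction M generalizing u with
  | nil => simp
  | cons m M' ih =>
    simp only [List.mem_cons, not_or] at hM
    constructor
    · intro h
      cases u with
      | nil =>
        simp only [List.nil_append, List.cons_prefix_cons] at h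
        exact absurd h.1.symm hM.1
      | cons x u' =>
        rw [List.cons_append, List.cons_prefix_cons] at h
        exact List.cons_prefix_cons.mpr ⟨h.1, (ih hM.2 u').mp h.2⟩
    · intro h
      exact h.trans (List.prefix_append u ('\n' :: v))

lemma drop_past {a b : List Char} {i : Nat} (h : a.length < i) :
    (a ++ '\n' :: b).drop i = b.drop (i - a.length - 1) := by
  rw [List.drop_append, List.drop_eq_nil_of_le (le_of_lt h)]
  have h2 : i - a.length = (i - a.length - 1) + 1 := by omega
  rw [h2, List.drop_succ_cons, List.nil_append]
  simp

lemma drop_at_nl (a b : List Char) : (a ++ '\n' :: b).drop (a.length + 1) = b := by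
  rw [drop_past (by omega)]
  simp

lemma find_eq_of {cs sub : List Char} {k : Nat} (h1 : sub <+: cs.drop k)
    (h2 : ∀ i < k, ¬ sub <+: cs.drop i) : PySem.Chars.find cs sub = (k : Int) := by
  have hin : sub <:+: cs := h1.isInfix.trans (List.drop_suffix k cs).isInfix
  have h0 : 0 ≤ PySem.Chars.find cs sub := (PySem.Chars.find_nonneg_iff cs sub).mpr hin
  obtain ⟨hocc, hmin⟩ := PySem.Chars.find_spec h0
  have ha : ¬ ((PySem.Chars.find cs sub).toNat < k) := fun hlt => (h2 _ hlt) hocc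
  have hb : ¬ (k < (PySem.Chars.find cs sub).toNat) := fun hlt => hmin k hlt h1
  omega

lemma singleton_prefix_cons {c d : Char} {t : List Char} : [c] <+: (d :: t) ↔ c = d := by
  rw [show ([c] : List Char) = c :: [] from rfl, List.cons_prefix_cons]
  simp

lemma find_nl_eq_length {u : List Char} (v : List Char) (h : '\n' ∉ u) :
    PySem.Chars.find (u ++ '\n' :: v) ['\n'] = (u.length : Int) := by
  apply find_eq_of
  · rw [List.drop_append_of_le_length le_rfl]
    simp
  · intro i hi hpre
    rw [List.drop_append_of_le_length (Nat.le_of_lt hi)] at hpre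
    rw [List.drop_eq_getElem_cons hi, List.cons_append, singleton_prefix_cons] at hpre
    exact h (hpre ▸ List.getElem_mem hi)

lemma find_nl_neg {w : List Char} (h : '\n' ∉ w) : PySem.Chars.find w ['\n'] = -1 := by
  rw [PySem.Chars.find_eq_neg_one_iff]
  intro hin
  exact h (hin.sublist.subset (by simp))

lemma pvFindStart_lb : ∀ (ls : List (List Char)) (i : Int),
    pvFindStart i ls = -1 ∨ i + 1 ≤ pvFindStart i ls := by
  intro ls
  induction ls with
  | nil => simp [pvFindStart]
  | cons l rest ih =>
    intro i
    by_cases hl : PySem.Chars.isIn pvMarker l = true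
    · simp [pvFindStart, hl]
    · simp only [pvFindStart, hl, if_false, Bool.false_eq_true]
      rcases ih (i + 1) with h | h
      · exact Or.inl h
      · exact Or.inr (by omega)

lemma pvFindStart_shift : ∀ (ls : List (List Char)) (i : Int),
    pvFindStart i ls = if pvFindStart 0 ls = -1 then -1 else i + pvFindStart 0 ls := by
  intro ls
  induction ls with
  | nil => simp [pvFindStart]
  | cons l rest ih =>
    intro i
    by_cases hl : PySem.Chars.isIn pvMarker l = true
    · simp [pvFindStart, hl]
    · simp only [pvFindStart, hl, if_false, Bool.false_eq_true, zero_add]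
      rw [ih (i + 1), ih 1]
      rcases pvFindStart_lb rest 0 with hp | hp
      · simp [hp]
      · have h1 : ¬ pvFindStart 0 rest = -1 := by omega
        have h2 : ¬ (1 : Int) + pvFindStart 0 rest = -1 := by omega
        simp only [h1, h2, if_false]
        ring

-- the marker occurs in a line of cs iff it occurs in cs: transport of prefix occurrences
lemma isIn_of_prefix_drop {a : List Char} {j : Nat} (h : pvMarker <+: a.drop j) :
    PySem.Chars.isIn pvMarker a = true :=
  (PySem.Chars.exists_prefix_drop_iff_isIn pvMarker a).mp ⟨j, h⟩

-- cores: each port with its fallback made explicit as 'none'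
def Acore (cs : List Char) : Option (List Char) :=
  let lines := mySplit cs
  let s := pvFindStart 0 lines
  if 0 ≤ s ∧ s < (lines.length : Int) then
    some (PySem.Chars.strip (PySem.Chars.join ['\n'] (lines.drop s.toNat)))
  else none

def Bcore (cs : List Char) : Option (List Char) :=
  let idx := PySem.Chars.find cs pvMarker
  if idx = -1 then none
  else
    let nl := PySem.Chars.findFrom cs ['\n'] idx
    if nl = -1 then none
    else some (PySem.Chars.strip (cs.drop (nl.toNat + 1)))

lemma pvMarker_no_nl : '\n' ∉ pvMarker := by decide

lemma core_no_nl {cs : List Char} (h : '\n' ∉ cs) : Acore cs = none ∧ Bcore cs = none := by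
  constructor
  · unfold Acore
    rw [mySplit_no_nl h]
    by_cases hi : PySem.Chars.isIn pvMarker cs = true <;>
      simp [pvFindStart, hi]
  · unfold Bcore
    by_cases hf : PySem.Chars.find cs pvMarker = -1
    · simp [hf]
    · have h0 : 0 ≤ PySem.Chars.find cs pvMarker := by
        have := PySem.Chars.neg_one_le_find cs pvMarker; omega
      have hkl : (PySem.Chars.find cs pvMarker).toNat ≤ cs.length := by
        have := PySem.Chars.find_le_length cs pvMarker; omega
      have hk : PySem.Chars.find cs pvMarker = (((PySem.Chars.find cs pvMarker).toNat : Nat) : Int) := by omega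
      simp only [hf, if_false]
      rw [hk, PySem.Chars.findFrom_natCast _ _ _ hkl]
      have hnil : PySem.Chars.find (cs.drop (PySem.Chars.find cs pvMarker).toNat) ['\n'] = -1 :=
        find_nl_neg (fun hm => h (List.drop_subset _ cs hm))
      simp [hnil]

lemma core_hit {a : List Char} (b : List Char) (ha : '\n' ∉ a)
    (hm : PySem.Chars.isIn pvMarker a = true) :
    Acore (a ++ '\n' :: b) = some (PySem.Chars.strip b)
      ∧ Bcore (a ++ '\n' :: b) = some (PySem.Chars.strip b) := by
  have hlen : 0 < (mySplit b).length := List.length_pos_of_ne_nil (mySplit_ne_nil b)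
  constructor
  · unfold Acore
    rw [mySplit_append b ha]
    simp only [pvFindStart, hm, if_true]
    rw [if_pos ⟨by norm_num, by simp only [List.length_cons]; push_cast; omega⟩]
    simp [join_mySplit]
  · have hinf : pvMarker <:+: a := (PySem.Chars.isIn_iff_infix _ _).mp hm
    have h0 : 0 ≤ PySem.Chars.find a pvMarker := (PySem.Chars.find_nonneg_iff _ _).mpr hinf
    obtain ⟨hocc, hmin⟩ := PySem.Chars.find_spec h0
    have hja : (PySem.Chars.find a pvMarker).toNat ≤ a.length := by
      have := PySem.Chars.find_le_length a pvMarker; omega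
    set j := (PySem.Chars.find a pvMarker).toNat with hj
    have hfind : PySem.Chars.find (a ++ '\n' :: b) pvMarker = (j : Int) := by
      apply find_eq_of
      · rw [List.drop_append_of_le_length hja]
        exact (prefix_through_nl pvMarker_no_nl _ _).mpr hocc
      · intro i hi hpre
        rw [List.drop_append_of_le_length (by omega)] at hpre
        exact hmin i hi ((prefix_through_nl pvMarker_no_nl _ _).mp hpre)
    unfold Bcore
    simp only [hfind]
    rw [if_neg (by omega)]
    rw [PySem.Chars.findFrom_natCast _ _ _ (by simp; omega)]
    have hdrop : (a ++ '\n' :: b).drop j = a.drop j ++ '\n' :: b :=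
      List.drop_append_of_le_length hja
    have hnn : '\n' ∉ a.drop j := fun hmem => ha (List.drop_subset _ a hmem)
    have hfnl : PySem.Chars.find ((a ++ '\n' :: b).drop j) ['\n'] = ((a.length - j : Nat) : Int) := by
      rw [hdrop, find_nl_eq_length b hnn, List.length_drop]
    rw [hfnl]
    rw [if_neg (by omega), if_neg (by omega)]
    have h1 : ((j : Int) + ((a.length - j : Nat) : Int)).toNat + 1 = a.length + 1 := by omega
    rw [h1, drop_at_nl]

lemma core_skip {a : List Char} (b : List Char) (ha : '\n' ∉ a)
    (hm : PySem.Chars.isIn pvMarker a = false) :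
    Acore (a ++ '\n' :: b) = Acore b ∧ Bcore (a ++ '\n' :: b) = Bcore b := by
  have hml : ¬ PySem.Chars.isIn pvMarker a = true := by simp [hm]
  constructor
  · unfold Acore
    rw [mySplit_append b ha]
    simp only [pvFindStart, hml, if_false, Bool.false_eq_true, zero_add]
    rw [pvFindStart_shift (mySplit b) 1]
    rcases pvFindStart_lb (mySplit b) 0 with hp | hp1
    · rw [hp, if_pos rfl]
      rw [if_neg (fun hcon => absurd hcon.1 (by norm_num)),
          if_neg (fun hcon => absurd hcon.1 (by norm_num))]
    · rw [if_neg (show ¬ pvFindStart 0 (mySplit b) = -1 by omega)]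
      by_cases hq : pvFindStart 0 (mySplit b) < ((mySplit b).length : Int)
      · rw [if_pos (And.intro (by omega)
              (by simp only [List.length_cons]; push_cast; omega)),
            if_pos (And.intro (by omega) hq)]
        have h2 : ((1 : Int) + pvFindStart 0 (mySplit b)).toNat
            = (pvFindStart 0 (mySplit b)).toNat + 1 := by omega
        rw [h2, List.drop_succ_cons]
      · rw [if_neg (fun hcon => hq (by
              have h3 := hcon.2
              simp only [List.length_cons] at h3
              push_cast at h3 ⊢
              omega)),
            if_neg (fun hcon => hq hcon.2)]
  · by_cases hf : PySem.Chars.find b pvMarker = -1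
    · have hcs : PySem.Chars.find (a ++ '\n' :: b) pvMarker = -1 := by
        rw [PySem.Chars.find_eq_neg_one_iff] at hf ⊢
        intro hin
        rcases (PySem.Chars.exists_prefix_drop_iff_isIn pvMarker _).mpr
          ((PySem.Chars.isIn_iff_infix _ _).mpr hin) with ⟨j, hpre⟩
        by_cases hja : j ≤ a.length
        · rw [List.drop_append_of_le_length hja] at hpre
          exact hml (isIn_of_prefix_drop ((prefix_through_nl pvMarker_no_nl _ _).mp hpre))
        · rw [drop_past (by omega)] at hpre
          exact hf ((PySem.Chars.isIn_iff_infix _ _).mp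
            ((PySem.Chars.exists_prefix_drop_iff_isIn pvMarker b).mp ⟨_, hpre⟩))
      unfold Bcore
      simp [hcs, hf]
    · have h0 : 0 ≤ PySem.Chars.find b pvMarker := by
        have := PySem.Chars.neg_one_le_find b pvMarker; omega
      obtain ⟨hocc, hmin⟩ := PySem.Chars.find_spec h0
      have hkb : (PySem.Chars.find b pvMarker).toNat ≤ b.length := by
        have := PySem.Chars.find_le_length b pvMarker; omega
      set k := (PySem.Chars.find b pvMarker).toNat with hk
      have hdk : ∀ t : Nat, (a ++ '\n' :: b).drop (a.length + 1 + t) = b.drop t := by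
        intro t
        rw [drop_past (by omega)]
        congr 1
        omega
      have hfind : PySem.Chars.find (a ++ '\n' :: b) pvMarker
          = ((a.length + 1 + k : Nat) : Int) := by
        apply find_eq_of
        · rw [hdk k]; exact hocc
        · intro i hi hpre
          by_cases hia : i ≤ a.length
          · rw [List.drop_append_of_le_length hia] at hpre
            exact hml (isIn_of_prefix_drop ((prefix_through_nl pvMarker_no_nl _ _).mp hpre))
          · rw [drop_past (by omega)] at hpre
            exact hmin (i - a.length - 1) (by omega) hpre
      unfold Bcore
      simp only [hfind]
      rw [if_neg (by omega)]
      rw [PySem.Chars.findFrom_natCast _ _ _ (by simp only [List.length_append, List.length_cons]; omega)]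
      rw [hdk k]
      have hkc : PySem.Chars.find b pvMarker = ((k : Nat) : Int) := by omega
      rw [if_neg hf, hkc, PySem.Chars.findFrom_natCast _ _ _ hkb]
      by_cases ht : PySem.Chars.find (b.drop k) ['\n'] = -1
      · simp [ht]
      · have ht0 : 0 ≤ PySem.Chars.find (b.drop k) ['\n'] := by
          have := PySem.Chars.neg_one_le_find (b.drop k) ['\n']; omega
        rw [if_neg ht, if_neg ht, if_neg (by omega), if_neg (by omega)]
        have harith : (((a.length + 1 + k : Nat) : Int)
              + PySem.Chars.find (b.drop k) ['\n']).toNat + 1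
            = a.length + 1 + (((k : Int) + PySem.Chars.find (b.drop k) ['\n']).toNat + 1) := by
          omega
        rw [harith, hdk _]

lemma core_eq_aux : ∀ (n : Nat) (cs : List Char), cs.length ≤ n → Acore cs = Bcore cs := by
  intro n
  induction n with
  | zero =>
    intro cs h
    have hnil : cs = [] := List.eq_nil_of_length_eq_zero (Nat.le_zero.mp h)
    subst hnil
    rcases core_no_nl List.not_mem_nil with ⟨h1, h2⟩
    rw [h1, h2]
  | succ n ih =>
    intro cs hlen
    by_cases hmem : '\n' ∈ cs
    · rcases nl_decomp hmem with ⟨a, b, rfl, hna⟩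
      have hb : b.length ≤ n := by
        simp only [List.length_append, List.length_cons] at hlen; omega
      by_cases hi : PySem.Chars.isIn pvMarker a = true
      · rcases core_hit b hna hi with ⟨h1, h2⟩; rw [h1, h2]
      · rcases core_skip b hna (by simpa using hi) with ⟨h1, h2⟩
        rw [h1, h2]; exact ih b hb
    · rcases core_no_nl hmem with ⟨h1, h2⟩; rw [h1, h2]

lemma A_eq_core (content : String) :
    extract_module_source_from_content_py content
      = ((Acore content.toList).map String.ofList).getD content := by
  unfold extract_module_source_from_content_py Acore
  rw [splitOn_eq_mySplit]
  by_cases hc : 0 ≤ pvFindStart 0 (mySplit content.toList) ∧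
      pvFindStart 0 (mySplit content.toList) < ((mySplit content.toList).length : Int)
  · simp only [if_pos hc]
    rw [PySem.List.slice_from _ hc.1]
    simp
  · simp only [if_neg hc]
    simp

lemma B_eq_core (content : String) :
    extract_module_source_from_content_py_alt content
      = ((Bcore content.toList).map String.ofList).getD content := by
  unfold extract_module_source_from_content_py_alt Bcore
  by_cases h1 : PySem.Chars.find content.toList pvMarker = -1
  · simp [h1]
  · simp only [h1, if_false]
    have hi0 : 0 ≤ PySem.Chars.find content.toList pvMarker := by
      have := PySem.Chars.neg_one_le_find content.toList pvMarker; omega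
    have hil : (PySem.Chars.find content.toList pvMarker).toNat ≤ content.toList.length := by
      have := PySem.Chars.find_le_length content.toList pvMarker; omega
    have hic : PySem.Chars.find content.toList pvMarker
        = (((PySem.Chars.find content.toList pvMarker).toNat : Nat) : Int) := by omega
    rw [hic, PySem.Chars.findFrom_natCast _ _ _ hil]
    by_cases h2 : PySem.Chars.find
        (content.toList.drop (PySem.Chars.find content.toList pvMarker).toNat) ['\n'] = -1
    · simp [h2]
    · have h20 : 0 ≤ PySem.Chars.find
          (content.toList.drop (PySem.Chars.find content.toList pvMarker).toNat) ['\n'] := by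
        have := PySem.Chars.neg_one_le_find
          (content.toList.drop (PySem.Chars.find content.toList pvMarker).toNat) ['\n']
        omega
      rw [if_neg h2, if_neg (by omega), if_neg (by omega)]
      rw [PySem.List.slice_from _ (by omega)]
      have heq : ((((PySem.Chars.find content.toList pvMarker).toNat : Nat) : Int)
            + PySem.Chars.find (content.toList.drop
                (PySem.Chars.find content.toList pvMarker).toNat) ['\n'] + 1).toNat
          = (((PySem.Chars.find content.toList pvMarker).toNat : Nat)
            + PySem.Chars.find (content.toList.drop
                (PySem.Chars.find content.toList pvMarker).toNat) ['\n']).toNat + 1 := by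
        omega
      rw [heq]
      simp

-- ===== VERDICT (by name: the statement is the Claim_ definition above) =====
theorem extract_module_source_from_content_py_spec : Claim_equal_extract_module_source_from_content_py := by
  intro content _
  unfold Spec_extract_module_source_from_content_py
  rw [A_eq_core, B_eq_core, core_eq_aux content.toList.length content.toList le_rfl]
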